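-- pv_equiv track=rewrite | github.com/Itdxl/Tasks | Tnkoff/Tinkfof 2.py | Count
-- ===== SOURCE A (Python) =====
-- def Count(A):
--     count = 0
--     if A == 1:
--         return 0
--     while A > 1:
--         if A % 2 == 0:
--             A = A // 2
--             count += 1
--         else:
--             A = A - 1
--             count += 1
--     return count
-- ===== SOURCE B (Python) =====
-- def Count(A):
--     if A <= 1:
--         return 0
--     return (A.bit_length() - 1) + (bin(A).count('1') - 1)
-- ===== Notes on version B (the rewrite author's own statement) =====
-- stated objective: faster
-- what changed: Replaced the step-by-step halve/decrement simulation loop with a closed-form bit formula: (bit_length-1) halving steps plus (popcount-1) decrement steps.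
import Mathlib
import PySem

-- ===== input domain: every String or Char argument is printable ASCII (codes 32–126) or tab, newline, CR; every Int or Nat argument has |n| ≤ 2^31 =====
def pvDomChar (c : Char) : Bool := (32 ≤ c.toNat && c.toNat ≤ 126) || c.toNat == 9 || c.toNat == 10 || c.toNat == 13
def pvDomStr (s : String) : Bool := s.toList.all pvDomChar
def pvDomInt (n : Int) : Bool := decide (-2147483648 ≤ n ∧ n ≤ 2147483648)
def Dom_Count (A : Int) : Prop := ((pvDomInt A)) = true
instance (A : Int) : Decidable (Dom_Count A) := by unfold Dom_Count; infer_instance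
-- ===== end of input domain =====

-- B replaces A's halve/decrement simulation loop by the closed-form bit formula
-- (bit_length - 1) + (popcount - 1); objective: faster (constant-time bit primitives).

-- ===== PORT A =====
-- the while loop of A, carrying (A, count)
def CountLoop (A : Int) (count : Int) : Int :=
  if h : A > 1 then
    if PySem.Int.mod A 2 = 0 then
      CountLoop (PySem.Int.floordiv A 2) (count + 1)
    else
      CountLoop (A - 1) (count + 1)
  else count
termination_by A.toNat
decreasing_by
  · rw [PySem.Int.floordiv_eq_ediv_of_pos (by omega)]; omega
  · omega

def Count (A : Int) : Int :=
  if A = 1 then 0 else CountLoop A 0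

-- ===== PORT B =====
def Count_alt (A : Int) : Int :=
  if A ≤ 1 then 0
  else ((PySem.Int.bitLength A : Int) - 1) + ((PySem.Int.bitCount A : Int) - 1)

-- ===== PRECONDITION & SPEC =====
def Spec_Count (A : Int) (out : Int) : Prop := out = Count_alt A
instance (A : Int) (out : Int) : Decidable (Spec_Count A out) := by unfold Spec_Count; infer_instance

-- ===== CLAIM (what is proved, stated in full; the proofs are below) =====
def Claim_equal_Count : Prop := ∀ (A : Int), Dom_Count A → Spec_Count A (Count A)

-- ===== LEMMAS AND PROOFS =====

theorem countLoop_eq (n : Nat) (hn : 1 ≤ n) :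
    ∀ c : Int, CountLoop (n : Int) c
      = c + ((PySem.Int.bitLength (n : Int) : Int) - 1)
          + ((PySem.Int.bitCount (n : Int) : Int) - 1) := by
  induction n using Nat.strong_induction_on with
  | _ n ih =>
    intro c
    rcases Nat.lt_or_ge n 2 with h2 | h2
    · -- n = 1 : the loop guard fails
      interval_cases n
      rw [CountLoop]
      have h1 : PySem.Int.bitLength (1:Int) = 1 := by decide
      have h2 : PySem.Int.bitCount (1:Int) = 1 := by decide
      push_cast
      rw [h1, h2]
      norm_num
    · -- n ≥ 2
      have hpos : (0:Int) < (n : Int) := by exact_mod_cast Nat.lt_of_lt_of_le Nat.zero_lt_one hn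
      have hgt : (n : Int) > 1 := by exact_mod_cast h2
      have hmod : PySem.Int.mod (n : Int) 2 = ((n % 2 : Nat) : Int) := by
        rw [PySem.Int.mod_eq_emod_of_pos (by norm_num)]; omega
      have hdiv : PySem.Int.floordiv (n : Int) 2 = ((n / 2 : Nat) : Int) := by
        rw [PySem.Int.floordiv_eq_ediv_of_pos (by norm_num)]; omega
      have hbl := PySem.Int.bitLength_natCast (m := n) (by omega)
      have hbc := PySem.Int.bitCount_natCast (m := n) (by omega)
      rw [CountLoop]
      rcases Nat.even_or_odd n with he | ho
      · -- even step: halve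
        have hm0 : n % 2 = 0 := Nat.even_iff.mp he
        rw [dif_pos hgt, if_pos (by rw [hmod, hm0]; norm_num), hdiv,
            ih (n / 2) (by omega) (by omega)]
        rw [hbl, hbc, hm0]
        push_cast
        omega
      · -- odd step: decrement; n - 1 is even with the same bit length and one fewer set bit
        have hm1 : n % 2 = 1 := Nat.odd_iff.mp ho
        have hsub : ((n : Int) - 1) = ((n - 1 : Nat) : Int) := by omega
        rw [dif_pos hgt, if_neg (by rw [hmod, hm1]; norm_num), hsub,
            ih (n - 1) (by omega) (by omega)]
        have hbl' := PySem.Int.bitLength_natCast (m := n - 1) (by omega)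
        have hbc' := PySem.Int.bitCount_natCast (m := n - 1) (by omega)
        have hq : (n - 1) / 2 = n / 2 := by omega
        have hq1 : (n - 1) % 2 = 0 := by omega
        rw [hbl', hbc', hbl, hbc, hq, hq1, hm1]
        push_cast
        omega

-- ===== VERDICT (by name: the statement is the Claim_ definition above) =====
theorem Count_spec : Claim_equal_Count := by
  intro A _
  unfold Spec_Count Count Count_alt
  rcases le_or_gt A 1 with hle | hgt
  · rcases eq_or_lt_of_le hle with h1 | h1
    · simp [h1]
    · rw [if_neg (by omega), if_pos hle, CountLoop, dif_neg (by omega)]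
  · have hA : A = ((A.toNat : Nat) : Int) := by omega
    rw [if_neg (by omega), if_neg (by omega), hA,
        countLoop_eq A.toNat (by omega)]
    ring
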